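-- pv_equiv track=rewrite | github.com/gring2/study_hard | codility/lesson1/solution.py | calc_gap
-- ===== SOURCE A (Python) =====
-- def calc_gap(binary_number_list, gap=0):
--     if len(binary_number_list) is 0: return gap
--
--     start = False
--     end = False
--     acc = []
--
--     while len(binary_number_list) > 0 and end is False:
--         number = binary_number_list.pop(0)
--         if number is 1 and start is False:
--             start = True
--         elif number is 1 and start is True:
--             binary_number_list.insert(0, number)
--             end = True
--         elif number is 0 and start is True:
--             acc.append(number)
--
--     if len(acc) > gap and end is True:
--         gap = len(acc)
--
--     return calc_gap(binary_number_list, gap)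
-- ===== SOURCE B (Python) =====
-- def calc_gap(binary_number_list, gap=0):
--     seen_one = False
--     run = 0
--     for number in binary_number_list:
--         if number == 1:
--             if seen_one and run > gap:
--                 gap = run
--             seen_one = True
--             run = 0
--         elif number == 0 and seen_one:
--             run += 1
--     return gap
-- ===== Notes on version B (the rewrite author's own statement) =====
-- stated objective: faster
-- what changed: Replaced A's recursion that repeatedly rescans the list with pop(0)/insert(0) per segment by a single linear pass keeping the current zero-run and the running maximum; B also does not mutate the input list.
import Mathlib
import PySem

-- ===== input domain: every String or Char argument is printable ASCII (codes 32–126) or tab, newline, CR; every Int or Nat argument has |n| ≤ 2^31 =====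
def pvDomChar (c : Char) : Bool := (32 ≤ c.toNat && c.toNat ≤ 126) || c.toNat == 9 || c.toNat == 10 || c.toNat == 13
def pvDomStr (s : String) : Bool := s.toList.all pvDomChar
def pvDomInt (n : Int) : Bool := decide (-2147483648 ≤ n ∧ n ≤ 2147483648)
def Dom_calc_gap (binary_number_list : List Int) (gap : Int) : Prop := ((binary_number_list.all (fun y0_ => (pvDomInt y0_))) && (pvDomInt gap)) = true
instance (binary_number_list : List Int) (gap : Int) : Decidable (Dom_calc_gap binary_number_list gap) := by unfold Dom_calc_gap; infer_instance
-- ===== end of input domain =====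

-- B replaces A's recursive pop(0)/insert(0) segment scanning (O(n^2)) with one linear pass
-- tracking the current zero run (objective: faster). A empties the caller's list in place;
-- the equivalence proved here is about the RETURN value only (B does not mutate its argument).

-- ===== PORT A =====
-- A's inner while loop: state = (remaining list, start, acc); returns (remaining, end, acc).
-- `number is 1` / `number is 0` compare by value on the ints Python interns here, ported as `=`.
def calcLoop : List Int → Bool → List Int → List Int × Bool × List Int
  | [], _, acc => ([], false, acc)
  | n :: rest, start, acc =>
    if n = 1 ∧ start = false then calcLoop rest true acc
    else if n = 1 ∧ start = true then (n :: rest, true, acc)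
    else if n = 0 ∧ start = true then calcLoop rest start (acc ++ [n])
    else calcLoop rest start acc

-- with start = false the loop always consumes the head, so the remainder is shorter
-- (needed by calc_gap's termination, cited in decreasing_by)
theorem calcLoop_len : ∀ (l : List Int) (start : Bool) (acc : List Int),
    ((calcLoop l start acc).1).length ≤ l.length := by
  intro l
  induction l with
  | nil => intro start acc; simp [calcLoop]
  | cons n rest ih =>
    intro start acc
    simp only [calcLoop]
    split_ifs with h1 h2 h3
    · exact le_trans (ih true acc) (Nat.le_succ _)
    · simp
    · exact le_trans (ih start (acc ++ [n])) (Nat.le_succ _)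
    · exact le_trans (ih start acc) (Nat.le_succ _)

theorem calcLoop_false_cons_len (n : Int) (rest acc : List Int) :
    ((calcLoop (n :: rest) false acc).1).length < (n :: rest).length := by
  simp only [calcLoop]
  split_ifs with h1 h2 h3
  · exact Nat.lt_succ_of_le (calcLoop_len rest true acc)
  · exact absurd h2.2 (by simp)
  · exact absurd h3.2 (by simp)
  · exact Nat.lt_succ_of_le (calcLoop_len rest false acc)

def calc_gap (binary_number_list : List Int) (gap : Int) : Int :=
  match binary_number_list with
  | [] => gap
  | n :: rest =>
    let r := calcLoop (n :: rest) false []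
    let gap' := if ((r.2.2.length : Int) > gap ∧ r.2.1 = true) then (r.2.2.length : Int) else gap
    calc_gap r.1 gap'
termination_by binary_number_list.length
decreasing_by exact calcLoop_false_cons_len n rest []

-- ===== PORT B =====
-- B's single for-loop: state = (seen_one, run, gap)
def altLoop : List Int → Bool → Int → Int → Int
  | [], _, _, gap => gap
  | n :: rest, seen, run, gap =>
    if n = 1 then altLoop rest true 0 (if seen = true ∧ run > gap then run else gap)
    else if n = 0 ∧ seen = true then altLoop rest seen (run + 1) gap
    else altLoop rest seen run gap

def calc_gap_alt (binary_number_list : List Int) (gap : Int) : Int :=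
  altLoop binary_number_list false 0 gap

-- ===== PRECONDITION & SPEC =====
def Spec_calc_gap (binary_number_list : List Int) (gap : Int) (out : Int) : Prop := out = calc_gap_alt binary_number_list gap
instance (binary_number_list : List Int) (gap : Int) (out : Int) : Decidable (Spec_calc_gap binary_number_list gap out) := by unfold Spec_calc_gap; infer_instance

-- ===== CLAIM (what is proved, stated in full; the proofs are below) =====
def Claim_equal_calc_gap : Prop := ∀ (binary_number_list : List Int) (gap : Int), Dom_calc_gap binary_number_list gap → Spec_calc_gap binary_number_list gap (calc_gap binary_number_list gap)

-- ===== LEMMAS AND PROOFS =====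

-- once the first 1 is seen: running A's segment scan and then flushing acc into gap equals
-- running B's loop with run = acc.length
theorem K_true : ∀ (l acc : List Int) (gap : Int),
    altLoop l true (acc.length : Int) gap =
      (let r := calcLoop l true acc
       altLoop r.1 false 0 (if ((r.2.2.length : Int) > gap ∧ r.2.1 = true) then (r.2.2.length : Int) else gap)) := by
  intro l
  induction l with
  | nil => intro acc gap; simp [calcLoop, altLoop]
  | cons n rest ih =>
    intro acc gap
    by_cases h1 : n = 1
    · subst h1
      simp [calcLoop, altLoop]
    · by_cases h0 : n = 0
      · subst h0
        have : ((acc ++ [(0:Int)]).length : Int) = (acc.length : Int) + 1 := by simp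
        simpa [calcLoop, altLoop, h1, this] using ih (acc ++ [(0:Int)]) gap
      · simp only [calcLoop, altLoop]
        simp only [h1, h0, false_and, if_false, and_true]
        exact ih acc gap

-- one round of A (scan from a fresh call, update gap) equals running B's loop over the same list
theorem K_false : ∀ (l : List Int) (gap : Int),
    altLoop l false 0 gap =
      (let r := calcLoop l false []
       altLoop r.1 false 0 (if ((r.2.2.length : Int) > gap ∧ r.2.1 = true) then (r.2.2.length : Int) else gap)) := by
  intro l
  induction l with
  | nil => intro gap; simp [calcLoop, altLoop]
  | cons n rest ih =>
    intro gap
    by_cases h1 : n = 1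
    · subst h1
      have := K_true rest ([] : List Int) gap
      simpa [calcLoop, altLoop] using this
    · by_cases h0 : n = 0
      · subst h0
        simpa [calcLoop, altLoop, h1] using ih gap
      · simpa [calcLoop, altLoop, h1, h0] using ih gap

theorem main_eq_aux : ∀ (m : Nat) (l : List Int), l.length = m → ∀ (gap : Int), calc_gap l gap = altLoop l false 0 gap := by
  intro m
  induction m using Nat.strong_induction_on with
  | _ m ih =>
    intro l hl gap
    match l with
    | [] => simp [calc_gap, altLoop]
    | n :: rest =>
      rw [calc_gap, K_false (n :: rest) gap]
      have hlt : ((calcLoop (n :: rest) false []).1).length < m := by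
        rw [← hl]; exact calcLoop_false_cons_len n rest []
      exact ih _ hlt _ rfl _

theorem main_eq (l : List Int) (gap : Int) : calc_gap l gap = altLoop l false 0 gap :=
  main_eq_aux l.length l rfl gap

-- ===== VERDICT (by name: the statement is the Claim_ definition above) =====
theorem calc_gap_spec : Claim_equal_calc_gap := by
  intro l gap _
  unfold Spec_calc_gap calc_gap_alt
  exact main_eq l gap
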